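-- pv_equiv track=rewrite | github.com/openfoodfacts/odoo-openfoodfacts | skill-pool/off_generate_form_translations.py | value_to_key
-- ===== SOURCE A (Python) =====
-- VALID_KEY_CHARS = set("0123456789abcdefghijklmnopqrstuvwxyz")
--
-- def value_to_key(value, default):
--   # we can't use codecs module :'(
--   last = None
--   chars = ["off_"]
--   for c in value.lower():
--     if c in VALID_KEY_CHARS:
--       chars.append(c)
--       last = c
--     elif last != "_":
--       chars.append("_")
--       last = "_"
--   return "".join(chars[:100]).strip("_")
-- ===== SOURCE B (Python) =====
-- VALID_KEY_CHARS = set("0123456789abcdefghijklmnopqrstuvwxyz")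
--
-- def value_to_key(value, default):
--     # Map every character to itself if valid else '_', then rebuild the
--     # run-collapsed string via split/join instead of a last-char state machine.
--     mapped = "".join(c if c in VALID_KEY_CHARS else "_" for c in value.lower())
--     words = [w for w in mapped.split("_") if w]
--     lead = "_" if mapped[:1] == "_" else ""
--     trail = "_" if mapped[-1:] == "_" and words else ""
--     collapsed = lead + "_".join(words) + trail
--     return ("off_" + collapsed[:99]).strip("_")
-- ===== Notes on version B (the rewrite author's own statement) =====
-- stated objective: alternative
-- what changed: Replaces A's character-by-character state machine (tracking the last emitted character to collapse underscore runs) with a map-to-underscore pass followed by split('_')/join of the non-empty words, re-attaching a leading/trailing underscore, then the same prefix/truncate/strip finish.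
import Mathlib
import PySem

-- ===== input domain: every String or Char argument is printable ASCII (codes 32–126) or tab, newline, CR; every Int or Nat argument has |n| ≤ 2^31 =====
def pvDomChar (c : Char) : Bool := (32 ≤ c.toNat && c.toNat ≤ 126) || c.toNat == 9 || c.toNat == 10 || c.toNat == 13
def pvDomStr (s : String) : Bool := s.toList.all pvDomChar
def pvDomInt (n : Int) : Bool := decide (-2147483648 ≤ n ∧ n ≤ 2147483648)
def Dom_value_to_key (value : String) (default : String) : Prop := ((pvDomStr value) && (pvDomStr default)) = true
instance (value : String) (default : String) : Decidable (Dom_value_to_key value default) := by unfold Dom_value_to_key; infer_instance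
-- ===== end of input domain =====

-- B replaces A's char-by-char state machine (tracking the last emitted char) by a
-- map-to-underscore pass followed by split('_') / join reconstruction; same return value.

def VALID_KEY_CHARS : PySem.Set Char :=
  PySem.Set.ofList "0123456789abcdefghijklmnopqrstuvwxyz".toList

-- ===== PORT A =====
def value_to_key (value : String) (default : String) : String :=
  let step : (Option Char × List (List Char)) → Char → (Option Char × List (List Char)) :=
    fun st c =>
      if PySem.Set.contains VALID_KEY_CHARS c then (some c, st.2 ++ [[c]])
      else if st.1 ≠ some '_' then (some '_', st.2 ++ [['_']])
      else st
  let st := (PySem.Chars.lower value.toList).foldl step (none, [['o','f','f','_']])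
  String.mk (PySem.Chars.stripChars
    (PySem.Chars.join [] (PySem.List.slice st.2 none (some 100))) ['_'])

-- ===== PORT B =====
def value_to_key_alt (value : String) (default : String) : String :=
  let mapped := (PySem.Chars.lower value.toList).map
    (fun c => if PySem.Set.contains VALID_KEY_CHARS c then c else '_')
  let words := (PySem.Chars.splitOn mapped ['_']).filter (fun w => w ≠ [])
  let lead := if PySem.List.slice mapped none (some 1) = ['_'] then ['_'] else ([] : List Char)
  let trail := if PySem.List.slice mapped (some (-1)) none = ['_'] ∧ words ≠ [] then ['_'] else ([] : List Char)
  let collapsed := lead ++ PySem.Chars.join ['_'] words ++ trail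
  String.mk (PySem.Chars.stripChars
    (['o','f','f','_'] ++ PySem.List.slice collapsed none (some 99)) ['_'])

-- ===== PRECONDITION & SPEC =====
def Spec_value_to_key (value : String) (default : String) (out : String) : Prop := out = value_to_key_alt value default
instance (value : String) (default : String) (out : String) : Decidable (Spec_value_to_key value default out) := by unfold Spec_value_to_key; infer_instance

-- ===== CLAIM (what is proved, stated in full; the proofs are below) =====
def Claim_equal_value_to_key : Prop := ∀ (value : String) (default : String), Dom_value_to_key value default → Spec_value_to_key value default (value_to_key value default)

-- ===== LEMMAS AND PROOFS =====


-- run-collapsing state machine on the mapped ('_'-for-invalid) string; skip = "last emitted was '_'"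
def sqz : Bool → List Char → List Char
  | _, [] => []
  | skip, c :: r => if c = '_' then (if skip then sqz true r else '_' :: sqz true r) else c :: sqz false r

-- structural form of Python's split('_')
def splitU : List Char → List (List Char)
  | [] => [[]]
  | c :: r => if c = '_' then [] :: splitU r else (splitU r).modifyHead (c :: ·)

def phiV (c : Char) : Char := if PySem.Set.contains VALID_KEY_CHARS c then c else '_'

def wds (m : List Char) : List (List Char) := (splitU m).filter (fun w => w ≠ [])

def jw (m : List Char) : List Char := PySem.Chars.join ['_'] (wds m)

def trailC (m : List Char) : List Char :=
  if m.getLast? = some '_' ∧ wds m ≠ [] then ['_'] else []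

lemma valid_ne_us {c : Char} (h : PySem.Set.contains VALID_KEY_CHARS c = true) : c ≠ '_' := by
  rintro rfl; revert h; decide

lemma modifyHead_id' {a : Type} (l : List a) : List.modifyHead (fun x => x) l = l := by
  cases l <;> simp

lemma getLast?_cons_ne (a : Char) (l : List Char) (h : l ≠ []) :
    (a :: l).getLast? = l.getLast? := by
  cases l with
  | nil => exact absurd rfl h
  | cons b t => simp [List.getLast?_cons_cons]

lemma foldA (L : List Char) (last : Option Char) (acc : List (List Char)) :
    (L.foldl (fun st c =>
      if PySem.Set.contains VALID_KEY_CHARS c then (some c, st.2 ++ [[c]])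
      else if st.1 ≠ some '_' then (some '_', st.2 ++ [['_']])
      else st) (last, acc)).2
    = acc ++ (sqz (last == some '_') (L.map phiV)).map (fun c => [c]) := by
  induction L generalizing last acc with
  | nil => simp [sqz]
  | cons c r ih =>
    by_cases hv : PySem.Set.contains VALID_KEY_CHARS c
    · simp only [List.foldl_cons, hv, if_true, List.map_cons, phiV]
      rw [ih, show (some c == some '_') = false from by simp [valid_ne_us hv]]
      simp [sqz, valid_ne_us hv]
    · by_cases hl : last = some '_'
      · subst hl
        simp only [List.foldl_cons, hv, if_false, phiV, List.map_cons, ne_eq,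
          not_true_eq_false, if_true, reduceIte]
        rw [ih]
        simp [sqz]
      · simp only [List.foldl_cons, hv, if_false, phiV, List.map_cons, ne_eq, hl,
        not_false_eq_true, if_true, reduceIte]
        rw [ih]
        simp [sqz, hl, List.append_assoc]

lemma go_split1 : ∀ (fuel : Nat) (l cur : List Char) (acc : List (List Char)), l.length < fuel →
    PySem.Chars.splitOn.go ['_'] fuel l cur acc
      = acc.reverse ++ (splitU l).modifyHead (cur.reverse ++ ·) := by
  intro fuel
  induction fuel with
  | zero => intro l cur acc h; omega
  | succ n ih =>
    intro l cur acc h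
    cases l with
    | nil => simp [PySem.Chars.splitOn.go, splitU]
    | cons c rest =>
      by_cases hc : c = '_'
      · subst hc
        simp only [PySem.Chars.splitOn.go, List.isPrefixOf, BEq.rfl, Bool.true_and, if_true]
        rw [show List.drop ['_'].length ('_' :: rest) = rest from rfl]
        rw [ih rest [] _ (by simpa using Nat.lt_of_succ_lt_succ h)]
        simp [splitU, modifyHead_id']
      · simp only [PySem.Chars.splitOn.go]
        rw [if_neg (by simp [List.isPrefixOf]; intro hh; exact hc hh.symm)]
        rw [ih rest (c :: cur) acc (by simpa using Nat.lt_of_succ_lt_succ h)]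
        simp [splitU, hc, List.modifyHead_modifyHead, Function.comp_def]

lemma splitOn_eq_split1 (m : List Char) : PySem.Chars.splitOn m ['_'] = splitU m := by
  rw [PySem.Chars.splitOn, go_split1 _ _ _ _ (by omega)]
  have : (fun x => List.reverse ([] : List Char) ++ x) = fun x => x := by funext x; simp
  simp [this, modifyHead_id']

lemma splitU_shape (m : List Char) : ∃ h t, splitU m = h :: t := by
  induction m with
  | nil => exact ⟨[], [], rfl⟩
  | cons c r ih =>
    obtain ⟨h, t, hr⟩ := ih
    by_cases hc : c = '_'
    · exact ⟨[], splitU r, by simp [splitU, hc]⟩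
    · exact ⟨c :: h, t, by simp [splitU, hc, hr, List.modifyHead]⟩

lemma wds_us (r : List Char) : wds ('_' :: r) = wds r := by
  simp [wds, splitU]

lemma wds_valid (c : Char) (r : List Char) (hc : c ≠ '_') :
    wds (c :: r) = (c :: (splitU r).headI) :: (splitU r).tail.filter (fun w => w ≠ []) := by
  obtain ⟨h, t, hr⟩ := splitU_shape r
  simp [wds, splitU, hc, hr, List.modifyHead]

lemma wds_nil_iff (m : List Char) : wds m = [] ↔ ∀ x ∈ m, x = '_' := by
  induction m with
  | nil => simp [wds, splitU]
  | cons c r ih =>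
    by_cases hc : c = '_'
    · subst hc; rw [wds_us, ih]; simp
    · rw [wds_valid c r hc]
      simp [hc]

lemma all_us_getLast? (r : List Char) (hr : r ≠ []) (h : ∀ x ∈ r, x = '_') :
    r.getLast? = some '_' := by
  have := List.getLast?_isSome.mpr hr
  obtain ⟨x, hx⟩ := Option.isSome_iff_exists.mp this
  rw [hx]
  have : x ∈ r := List.mem_of_getLast? hx
  rw [h x this]

lemma join_head_cons (sep b : List Char) (c : Char) (l : List (List Char)) :
    PySem.Chars.join sep ((c :: b) :: l) = c :: PySem.Chars.join sep (b :: l) := by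
  cases l with
  | nil => simp [PySem.Chars.join_singleton]
  | cons w ws => simp [PySem.Chars.join_cons_cons]

lemma wds_ne_nil_of_cons (r2 : List Char) (w : List Char) (ws : List (List Char))
    (h : wds r2 = w :: ws) : r2 ≠ [] := by
  intro hr; rw [hr] at h; simp [wds, splitU] at h

lemma all_us_sqz_true (r : List Char) (h : ∀ x ∈ r, x = '_') : sqz true r = [] := by
  induction r with
  | nil => rfl
  | cons c t ih =>
    have hc : c = '_' := h c (by simp)
    subst hc
    simp only [sqz, if_pos rfl]
    exact ih (fun x hx => h x (by simp [hx]))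

lemma main_collapse (m : List Char) :
    ((if m.head? = some '_' then ['_'] else []) ++ jw m ++ trailC m = sqz false m)
    ∧ (jw m ++ trailC m = sqz true m) := by
  induction m with
  | nil => simp [jw, trailC, wds, splitU, sqz, PySem.Chars.join_nil]
  | cons c r ih =>
    by_cases hc : c = '_'
    · subst hc
      cases r with
      | nil =>
        constructor <;> simp [jw, trailC, wds, splitU, sqz, PySem.Chars.join_nil]
      | cons d r2 =>
        have hT : jw ('_' :: d :: r2) ++ trailC ('_' :: d :: r2)
            = jw (d :: r2) ++ trailC (d :: r2) := by
          have hw : wds ('_' :: d :: r2) = wds (d :: r2) := wds_us (d :: r2)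
          rw [show jw ('_' :: d :: r2) = jw (d :: r2) from by simp [jw, hw]]
          rw [show trailC ('_' :: d :: r2) = trailC (d :: r2) from by
            simp [trailC, hw, getLast?_cons_ne '_' (d :: r2) (by simp)]]
        have h2 : jw ('_' :: d :: r2) ++ trailC ('_' :: d :: r2) = sqz true ('_' :: d :: r2) := by
          rw [hT, ih.2, show sqz true ('_' :: d :: r2) = sqz true (d :: r2) from by simp [sqz]]
        refine ⟨?_, h2⟩
        rw [show sqz false ('_' :: d :: r2) = '_' :: sqz true (d :: r2) from by simp [sqz]]
        rw [show (if ('_' :: d :: r2).head? = some '_' then ['_'] else ([] : List Char)) = ['_'] from by simp]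
        rw [List.append_assoc, hT, ih.2]
        simp
    · have hsq : sqz false (c :: r) = c :: sqz false r := by simp [sqz, hc]
      have hsqt : sqz true (c :: r) = c :: sqz false r := by simp [sqz, hc]
      have hhead : ¬ ((c :: r).head? = some '_') := by simp [hc]
      suffices hS : jw (c :: r) ++ trailC (c :: r) = c :: sqz false r by
        refine ⟨?_, by rw [hsqt]; exact hS⟩
        rw [hsq, if_neg hhead]
        simpa using hS
      cases r with
      | nil =>
        simp [jw, trailC, wds, splitU, hc, List.modifyHead, sqz,
          PySem.Chars.join_singleton]
      | cons d r2 =>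
        by_cases hd : d = '_'
        · subst hd
          have h1 : wds (c :: '_' :: r2) = [c] :: wds r2 := by
            rw [wds_valid c _ hc]
            simp [splitU, wds]
          have hwus : wds ('_' :: r2) = wds r2 := wds_us r2
          rw [show sqz false ('_' :: r2) = '_' :: sqz true r2 from by simp [sqz]]
          rcases hw2 : wds r2 with _ | ⟨w, ws⟩
          · -- r2 is all underscores: everything after c collapses to one '_'
            have hall : ∀ x ∈ r2, x = '_' := (wds_nil_iff r2).mp hw2
            have hlast2 : ('_' :: r2).getLast? = some '_' := by
              apply all_us_getLast? _ (by simp)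
              intro x hx
              rcases List.mem_cons.mp hx with h | h
              · exact h
              · exact hall x h
            rw [all_us_sqz_true r2 hall]
            rw [show jw (c :: '_' :: r2) = [c] from by
              simp [jw, h1, hw2, PySem.Chars.join_singleton]]
            rw [show trailC (c :: '_' :: r2) = ['_'] from by
              simp [trailC, h1, getLast?_cons_ne c ('_' :: r2) (by simp), hlast2]]
            rfl
          · -- r2 still contains a word
            have hr2ne : r2 ≠ [] := wds_ne_nil_of_cons r2 w ws hw2
            have hjw : jw (c :: '_' :: r2) = c :: '_' :: jw r2 := by
              rw [show jw r2 = PySem.Chars.join ['_'] (w :: ws) from by simp [jw, hw2]]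
              rw [jw, h1, hw2, join_head_cons, PySem.Chars.join_cons_cons]
              simp
            have htr : trailC (c :: '_' :: r2) = trailC r2 := by
              simp [trailC, h1, hw2, getLast?_cons_ne c ('_' :: r2) (by simp),
                getLast?_cons_ne '_' r2 hr2ne]
            have hih : jw r2 ++ trailC r2 = sqz true r2 := by
              have := ih.2
              rw [show jw ('_' :: r2) = jw r2 from by simp [jw, hwus],
                show trailC ('_' :: r2) = trailC r2 from by
                  simp [trailC, hwus, getLast?_cons_ne '_' r2 hr2ne],
                show sqz true ('_' :: r2) = sqz true r2 from by simp [sqz]] at this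
              exact this
            rw [hjw, htr]
            simp only [List.cons_append]
            rw [hih]
        · -- both c and d valid: jw gains c in front, trail unchanged
          obtain ⟨h2, t2, hr2⟩ := splitU_shape r2
          have hsplit : splitU (d :: r2) = (d :: h2) :: t2 := by
            simp [splitU, hd, hr2, List.modifyHead]
          have hjm : jw (c :: d :: r2) = c :: jw (d :: r2) := by
            rw [jw, wds_valid c _ hc, hsplit, jw, wds_valid d _ hd, hr2]
            simp only [List.headI, List.tail_cons]
            rw [join_head_cons]
          have htr : trailC (c :: d :: r2) = trailC (d :: r2) := by
            simp [trailC, wds_valid c _ hc, wds_valid d _ hd, hsplit,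
              getLast?_cons_ne c (d :: r2) (by simp)]
          rw [hjm, htr]
          have hlead : ¬ ((d :: r2).head? = some '_') := by simp [hd]
          have := ih.1
          rw [if_neg hlead] at this
          simp only [List.nil_append] at this
          simp only [List.cons_append]
          rw [this]

lemma slice_take_one (m : List Char) : PySem.List.slice m none (some 1) = m.take 1 := by
  simp [PySem.List.slice]

lemma take_one_iff (m : List Char) : m.take 1 = ['_'] ↔ m.head? = some '_' := by
  cases m <;> simp

lemma slice_last_iff (m : List Char) :
    PySem.List.slice m (some (-1)) none = ['_'] ↔ m.getLast? = some '_' := by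
  cases m with
  | nil => simp [PySem.List.slice]
  | cons c r =>
    have hne : (c :: r) ≠ [] := by simp
    have h2 : List.drop ((c :: r).length - 1) (c :: r) = [(c :: r).getLast hne] :=
      List.drop_length_sub_one hne
    simp only [PySem.List.slice]
    norm_num
    rw [show List.drop r.length (c :: r) = [(c :: r).getLast hne] from by
      simpa using h2]
    rw [List.getLast?_eq_some_getLast hne]
    simp

lemma slice_take_99 (m : List Char) : PySem.List.slice m none (some 99) = m.take 99 := by
  simp [PySem.List.slice]

lemma slice_take_100 (m : List (List Char)) :
    PySem.List.slice m none (some 100) = m.take 100 := by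
  simp [PySem.List.slice]

lemma join_nil_cons (a : List Char) (l : List (List Char)) :
    PySem.Chars.join [] (a :: l) = a ++ PySem.Chars.join [] l := by
  cases l with
  | nil => simp [PySem.Chars.join_singleton, PySem.Chars.join_nil]
  | cons w ws => simp [PySem.Chars.join_cons_cons]


-- ===== VERDICT (by name: the statement is the Claim_ definition above) =====
theorem value_to_key_spec : Claim_equal_value_to_key := by
  intro value default _
  unfold Spec_value_to_key
  simp only [value_to_key, value_to_key_alt]
  set L := PySem.Chars.lower value.toList with hL
  set m := L.map phiV with hm
  -- A side
  rw [show (fun c => if PySem.Set.contains VALID_KEY_CHARS c then c else '_') = phiV from rfl]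
  rw [foldA]
  rw [slice_take_100, splitOn_eq_split1]
  rw [show (none == some '_') = false from rfl]
  -- turn chars[:100] into off ++ (collapsed chars).take 99
  rw [show (([['o','f','f','_']] ++ (sqz false m).map (fun c => [c])).take 100)
      = ['o','f','f','_'] :: ((sqz false m).take 99).map (fun c => [c]) from by
    simp [List.take_succ_cons, List.map_take]]
  rw [join_nil_cons, PySem.Chars.join_nil_singletons]
  -- B side: collapsed = sqz false m
  rw [slice_take_one, slice_take_99]
  have hmain := main_collapse m
  have hcoll :
      (if m.take 1 = ['_'] then ['_'] else []) ++
        PySem.Chars.join ['_'] ((splitU m).filter (fun w => w ≠ [])) ++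
        (if PySem.List.slice m (some (-1)) none = ['_'] ∧
            (splitU m).filter (fun w => w ≠ []) ≠ [] then ['_'] else [])
      = sqz false m := by
    rw [← hmain.1]
    simp only [take_one_iff, slice_last_iff]
    rfl
  rw [hcoll]
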